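-- pv_equiv track=rewrite | github.com/etabella30-sketch/com-realtime-local | apps/search/execution.py | flatten_transcript
-- ===== SOURCE A (Python) =====
-- def flatten_transcript(transcript):
--     word_list = []
--     position_list = []
--     char_spans = []
--     char_index = 0
--
--     for line_index, entry in enumerate(transcript):
--         words = entry['text'].split()
--         # Remove all '^' from the text before splitting
--         # clean_text = entry['text'].replace("^", "")
--         # words = clean_text.split()
--         # words = tokenize(entry['text'])
--         for word_index, word in enumerate(words):
--             word_list.append(word)
--             position_list.append((line_index, word_index))
--             start = char_index
--             end = start + len(word)
--             char_spans.append((start, end))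
--             char_index = end + 1  # +1 for space
--
--     flat_text = " ".join(word_list)
--     return flat_text, word_list, position_list, char_spans
-- ===== SOURCE B (Python) =====
-- def flatten_transcript(transcript):
--     word_list = [w for entry in transcript for w in entry['text'].split()]
--     position_list = [(i, j) for i, entry in enumerate(transcript)
--                             for j, _ in enumerate(entry['text'].split())]
--     offsets = [0]
--     for w in word_list:
--         offsets.append(offsets[-1] + len(w) + 1)
--     char_spans = [(o, o + len(w)) for o, w in zip(offsets, word_list)]
--     return " ".join(word_list), word_list, position_list, char_spans
-- ===== Notes on version B (the rewrite author's own statement) =====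
-- stated objective: alternative
-- what changed: Replaces the single nested loop carrying a running char_index alongside three output lists by a phase-separated version: words and positions come from two flat comprehensions, and char spans are read off a prefix-sum offset table zipped with the word list.
import Mathlib
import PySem

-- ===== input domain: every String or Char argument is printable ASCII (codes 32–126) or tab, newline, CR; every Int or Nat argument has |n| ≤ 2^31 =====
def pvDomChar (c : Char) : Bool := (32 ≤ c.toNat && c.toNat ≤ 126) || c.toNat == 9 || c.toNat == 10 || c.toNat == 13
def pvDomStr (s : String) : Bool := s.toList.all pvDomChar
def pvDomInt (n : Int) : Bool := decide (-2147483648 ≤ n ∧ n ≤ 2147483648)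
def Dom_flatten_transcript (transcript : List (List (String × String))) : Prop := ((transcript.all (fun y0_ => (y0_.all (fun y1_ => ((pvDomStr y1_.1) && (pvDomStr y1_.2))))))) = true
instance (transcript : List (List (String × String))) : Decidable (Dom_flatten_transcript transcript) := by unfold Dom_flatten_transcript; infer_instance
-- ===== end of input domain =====

-- B separates concerns: words/positions by flat comprehensions, char spans read off a
-- prefix-sum offset table zipped with the word list, instead of A's single nested loop
-- carrying a running char_index; same cost, alternative decomposition.

-- entry['text'].split()  (dict lookup = first match in the association list)
def wordsOf (entry : List (String × String)) : List String :=
  PySem.Str.split₀ ((List.lookup "text" entry).getD "")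

-- ===== PORT A =====
def flatten_transcript (transcript : List (List (String × String))) : String × List String × (List (Int × Int)) × (List (Int × Int)) :=
  let st := (PySem.List.enumerate transcript 0).foldl
    (fun st p =>
      (PySem.List.enumerate (wordsOf p.2) 0).foldl
        (fun st2 q =>
          let start := st2.2.2.2
          let e := start + PySem.Str.len q.2
          (st2.1 ++ [q.2], st2.2.1 ++ [(p.1, q.1)], st2.2.2.1 ++ [(start, e)], e + 1))
        st)
    (([] : List String), ([] : List (Int × Int)), ([] : List (Int × Int)), (0 : Int))
  (PySem.Str.join " " st.1, st.1, st.2.1, st.2.2.1)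

-- ===== PORT B =====
def flatten_transcript_alt (transcript : List (List (String × String))) : String × List String × (List (Int × Int)) × (List (Int × Int)) :=
  let word_list := transcript.flatMap (fun entry => wordsOf entry)
  let position_list := (PySem.List.enumerate transcript 0).flatMap
    (fun p => (PySem.List.enumerate (wordsOf p.2) 0).map (fun q => (p.1, q.1)))
  let offsets := word_list.foldl
    (fun offs w => offs ++ [PySem.List.pyGetD offs (-1) 0 + PySem.Str.len w + 1]) [(0 : Int)]
  let char_spans := (offsets.zip word_list).map (fun ow => (ow.1, ow.1 + PySem.Str.len ow.2))
  (PySem.Str.join " " word_list, word_list, position_list, char_spans)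

-- ===== PRECONDITION & SPEC =====
-- Pre_ excludes exactly the inputs where Python A raises KeyError: an entry without a 'text' key.
def Pre_flatten_transcript (transcript : List (List (String × String))) : Prop :=
  ∀ e ∈ transcript, (List.lookup "text" e).isSome
instance (transcript : List (List (String × String))) : Decidable (Pre_flatten_transcript transcript) := by unfold Pre_flatten_transcript; infer_instance
def pvWitness_flatten_transcript : (List (List (String × String))) := [[("text", "hello world")], [("text", "a b  c")]]

def Spec_flatten_transcript (transcript : List (List (String × String))) (out : String × List String × (List (Int × Int)) × (List (Int × Int))) : Prop := out = flatten_transcript_alt transcript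
instance (transcript : List (List (String × String))) (out : String × List String × (List (Int × Int)) × (List (Int × Int))) : Decidable (Spec_flatten_transcript transcript out) := by unfold Spec_flatten_transcript; infer_instance

-- ===== CLAIM (what is proved, stated in full; the proofs are below) =====
def Claim_equal_flatten_transcript : Prop := ∀ (transcript : List (List (String × String))), Dom_flatten_transcript transcript → Pre_flatten_transcript transcript → Spec_flatten_transcript transcript (flatten_transcript transcript)

-- ===== LEMMAS AND PROOFS =====

-- spans of consecutive words starting at offset c, each word followed by one space
def spansFrom : Int → List String → List (Int × Int)
  | _, [] => []
  | c, w :: ws => (c, c + PySem.Str.len w) :: spansFrom (c + PySem.Str.len w + 1) ws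

-- the offset right after all words of ws starting at c
def endOff : Int → List String → Int
  | c, [] => c
  | c, w :: ws => endOff (c + PySem.Str.len w + 1) ws

-- the tail of B's offsets table after initial [c]
def tailOffs : Int → List String → List Int
  | _, [] => []
  | c, w :: ws => (c + PySem.Str.len w + 1) :: tailOffs (c + PySem.Str.len w + 1) ws

def flatW : List (List (String × String)) → List String
  | [] => []
  | e :: t => wordsOf e ++ flatW t

def posOf : Int → List (List (String × String)) → List (Int × Int)
  | _, [] => []
  | s, e :: t => (PySem.List.enumerate (wordsOf e) 0).map (fun q => (s, q.1)) ++ posOf (s + 1) t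

lemma endOff_append (xs ys : List String) : ∀ c, endOff c (xs ++ ys) = endOff (endOff c xs) ys := by
  induction xs with
  | nil => intro c; simp [endOff]
  | cons w ws ih => intro c; simp [endOff, ih]

lemma spansFrom_append (xs ys : List String) : ∀ c, spansFrom c (xs ++ ys) = spansFrom c xs ++ spansFrom (endOff c xs) ys := by
  induction xs with
  | nil => intro c; simp [spansFrom, endOff]
  | cons w ws ih => intro c; simp [spansFrom, endOff, ih]

-- closed form of A's inner loop
lemma innerA_spec (li : Int) (ws : List String) : ∀ (s : Int) (wl : List String) (pl cs : List (Int × Int)) (ci : Int),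
    (PySem.List.enumerate ws s).foldl
        (fun st2 q =>
          let start := st2.2.2.2
          let e := start + PySem.Str.len q.2
          (st2.1 ++ [q.2], st2.2.1 ++ [(li, q.1)], st2.2.2.1 ++ [(start, e)], e + 1))
        (wl, pl, cs, ci)
      = (wl ++ ws, pl ++ (PySem.List.enumerate ws s).map (fun q => (li, q.1)), cs ++ spansFrom ci ws, endOff ci ws) := by
  induction ws with
  | nil => intro s wl pl cs ci; simp [PySem.List.enumerate_nil, spansFrom, endOff]
  | cons w rest ih =>
      intro s wl pl cs ci
      simp only [PySem.List.enumerate_cons, List.foldl_cons, List.map_cons]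
      rw [ih]
      simp [spansFrom, endOff]

-- closed form of A's outer loop
lemma outerA_spec (ts : List (List (String × String))) : ∀ (s : Int) (wl : List String) (pl cs : List (Int × Int)) (ci : Int),
    (PySem.List.enumerate ts s).foldl
      (fun st p =>
        (PySem.List.enumerate (wordsOf p.2) 0).foldl
          (fun st2 q =>
            let start := st2.2.2.2
            let e := start + PySem.Str.len q.2
            (st2.1 ++ [q.2], st2.2.1 ++ [(p.1, q.1)], st2.2.2.1 ++ [(start, e)], e + 1))
          st)
      (wl, pl, cs, ci)
    = (wl ++ flatW ts, pl ++ posOf s ts, cs ++ spansFrom ci (flatW ts), endOff ci (flatW ts)) := by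
  induction ts with
  | nil => intro s wl pl cs ci; simp [PySem.List.enumerate_nil, flatW, posOf, spansFrom, endOff]
  | cons e t ih =>
      intro s wl pl cs ci
      simp only [PySem.List.enumerate_cons, List.foldl_cons]
      rw [innerA_spec, ih]
      simp [flatW, posOf, spansFrom_append, endOff_append, List.append_assoc]

-- B's word comprehension
lemma flatMap_words (ts : List (List (String × String))) : ts.flatMap (fun entry => wordsOf entry) = flatW ts := by
  induction ts with
  | nil => rfl
  | cons e t ih => simp [flatW, ih]

-- B's position comprehension
lemma flatMap_pos (ts : List (List (String × String))) : ∀ s : Int,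
    (PySem.List.enumerate ts s).flatMap (fun p => (PySem.List.enumerate (wordsOf p.2) 0).map (fun q => (p.1, q.1))) = posOf s ts := by
  induction ts with
  | nil => intro s; simp [PySem.List.enumerate_nil, posOf]
  | cons e t ih => intro s; simp [PySem.List.enumerate_cons, posOf, ih]

lemma pyGetD_last (offs : List Int) (c : Int) (h : offs.getLast? = some c) :
    PySem.List.pyGetD offs (-1) 0 = c := by
  simp [PySem.List.pyGetD, PySem.List.pyGet?_neg_one, h]

-- closed form of B's offsets loop
lemma offsets_spec (W : List String) : ∀ (offs : List Int) (c : Int), offs.getLast? = some c →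
    W.foldl (fun offs w => offs ++ [PySem.List.pyGetD offs (-1) 0 + PySem.Str.len w + 1]) offs
      = offs ++ tailOffs c W := by
  induction W with
  | nil => intro offs c h; simp [tailOffs]
  | cons w ws ih =>
      intro offs c h
      simp only [List.foldl_cons]
      rw [pyGetD_last offs c h, ih (offs ++ [c + PySem.Str.len w + 1]) (c + PySem.Str.len w + 1) (by simp)]
      simp [tailOffs]

-- the zipped span table is spansFrom
lemma zip_spans (W : List String) : ∀ c : Int,
    (((c :: tailOffs c W).zip W).map (fun ow => (ow.1, ow.1 + PySem.Str.len ow.2))) = spansFrom c W := by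
  induction W with
  | nil => intro c; simp [tailOffs, spansFrom]
  | cons w ws ih => intro c; simp only [tailOffs, spansFrom, List.zip_cons_cons, List.map_cons, ih]

-- ===== VERDICT (by name: the statement is the Claim_ definition above) =====
theorem flatten_transcript_spec : Claim_equal_flatten_transcript := by
  intro transcript _ _
  show flatten_transcript transcript = flatten_transcript_alt transcript
  unfold flatten_transcript flatten_transcript_alt
  simp only [flatMap_words, flatMap_pos]
  rw [outerA_spec, offsets_spec (flatW transcript) [0] 0 (by simp)]
  simp only [List.nil_append, List.singleton_append]
  rw [zip_spans]
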